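-- pv_equiv track=rewrite | github.com/Nwldo/DOT | lista_4/list_q10.py | maior_soma_repetidos
-- ===== SOURCE A (Python) =====
-- def maior_soma_repetidos(lista):
--     soma = 0
--     for i in set(lista):
--         if lista.count(i) > 1:
--             soma_atual = i * lista.count(i)
--             if soma_atual > soma:
--                 soma = soma_atual
--     return soma
-- ===== SOURCE B (Python) =====
-- def maior_soma_repetidos(lista):
--     # Sort once, then scan runs of consecutive equal values (sort-then-group
--     # instead of set() + per-element .count rescans).
--     def scan(s, best):
--         while s:
--             x = s[0]
--             run = 1
--             while run < len(s) and s[run] == x: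
--                 run += 1
--             if run > 1 and x * run > best:
--                 best = x * run
--             s = s[run:]
--         return best
--     return scan(sorted(lista), 0)
-- ===== Notes on version B (the rewrite author's own statement) =====
-- stated objective: faster
-- what changed: Replaces set(lista) plus a repeated lista.count(i) scan per distinct element with sorting the list once and a single pass over runs of consecutive equal values.
import Mathlib
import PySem

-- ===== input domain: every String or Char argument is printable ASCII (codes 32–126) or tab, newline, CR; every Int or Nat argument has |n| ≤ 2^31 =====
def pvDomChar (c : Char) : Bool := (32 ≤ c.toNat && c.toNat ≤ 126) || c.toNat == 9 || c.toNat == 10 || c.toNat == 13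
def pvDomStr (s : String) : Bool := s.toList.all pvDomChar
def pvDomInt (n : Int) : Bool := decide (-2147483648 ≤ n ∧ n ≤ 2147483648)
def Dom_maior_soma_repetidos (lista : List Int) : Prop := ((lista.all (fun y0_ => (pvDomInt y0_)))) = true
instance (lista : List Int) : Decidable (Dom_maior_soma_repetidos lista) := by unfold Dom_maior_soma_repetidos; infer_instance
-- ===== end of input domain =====

-- B sorts the list once and scans runs of consecutive equal values instead of
-- A's set() + per-element .count rescans (objective: faster).


-- ===== PORT A =====
def maior_soma_repetidos (lista : List Int) : Int :=
  (PySem.Set.ofList lista).foldl (fun soma i =>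
    if PySem.List.count lista i > 1 then
      let soma_atual := i * (PySem.List.count lista i : Int)
      if soma_atual > soma then soma_atual else soma
    else soma) 0

-- ===== PORT B =====
-- inner 'while s: … s = s[run:]' loop of Source B's scan: run = length of the
-- leading run of values equal to s[0]; s[run:] is dropWhile of that run.
def scanRuns : List Int → Int → Int
  | [], best => best
  | x :: rest, best =>
    let run : Int := 1 + ((rest.takeWhile (· == x)).length : Int)
    let best' := if run > 1 ∧ x * run > best then x * run else best
    scanRuns (rest.dropWhile (· == x)) best'
termination_by s _ => s.length
decreasing_by
  exact Nat.lt_succ_of_le (List.length_dropWhile_le _ _)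

def maior_soma_repetidos_alt (lista : List Int) : Int :=
  scanRuns (PySem.List.sorted lista (fun x => x) false) 0

-- ===== PRECONDITION & SPEC =====
def Spec_maior_soma_repetidos (lista : List Int) (out : Int) : Prop := out = maior_soma_repetidos_alt lista
instance (lista : List Int) (out : Int) : Decidable (Spec_maior_soma_repetidos lista out) := by unfold Spec_maior_soma_repetidos; infer_instance

-- ===== CLAIM (what is proved, stated in full; the proofs are below) =====
def Claim_equal_maior_soma_repetidos : Prop := ∀ (lista : List Int), Dom_maior_soma_repetidos lista → Spec_maior_soma_repetidos lista (maior_soma_repetidos lista)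

-- ===== LEMMAS AND PROOFS =====

-- Canonical form both programs reduce to: a running max of the candidate
-- 'i * count i if count i > 1 else 0' over a list of distinct keys.
def mstep (c : Int → Nat) : Int → Int → Int :=
  fun soma i => max soma (if 1 < c i then i * (c i : Int) else 0)

theorem mstep_nonneg (c : Int → Nat) (soma i : Int) (h : 0 ≤ soma) :
    0 ≤ mstep c soma i := le_trans h (le_max_left _ _)

def mstep_rcomm (c : Int → Nat) : RightCommutative (mstep c) :=
  ⟨fun b a₁ a₂ => by unfold mstep; rw [max_right_comm]⟩

-- A's fold is the canonical running max (needs the 0 ≤ soma invariant).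
theorem foldA_eq (lista : List Int) :
    ∀ (keys : List Int) (soma : Int), 0 ≤ soma →
      keys.foldl (fun soma i =>
        if PySem.List.count lista i > 1 then
          let soma_atual := i * (PySem.List.count lista i : Int)
          if soma_atual > soma then soma_atual else soma
        else soma) soma
      = keys.foldl (mstep (fun i => lista.count i)) soma := by
  intro keys
  induction keys with
  | nil => intro soma _; rfl
  | cons k t ih =>
    intro soma h0
    simp only [List.foldl_cons]
    have hstep : (if PySem.List.count lista k > 1 then
        let soma_atual := k * (PySem.List.count lista k : Int)
        if soma_atual > soma then soma_atual else soma
      else soma) = mstep (fun i => lista.count i) soma k := by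
      unfold mstep
      simp only [PySem.List.count_eq]
      split_ifs with h1 h2 <;> omega
    rw [hstep, ih _ (mstep_nonneg _ _ _ h0)]

-- B's run scan on a sorted list is the same canonical running max over some
-- nodup key list with the same membership as the sorted list.
-- x ∉ dropWhile (· == x) rest when x :: rest is sorted.
theorem not_mem_dropWhile_of_sorted (x : Int) (rest : List Int)
    (hs : (x :: rest).Pairwise (· ≤ ·)) : x ∉ rest.dropWhile (· == x) := by
  intro hx
  rcases hmt : rest.dropWhile (· == x) with _ | ⟨z, t'⟩
  · rw [hmt] at hx; exact absurd hx (List.not_mem_nil)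
  · rw [hmt] at hx
    have hz : ¬ (z == x) = true := by
      have := List.head_dropWhile_not (· == x) (l := rest) (by rw [hmt]; simp)
      simpa [hmt] using this
    have hzx : z ≠ x := by simpa using hz
    have hzrest : z ∈ rest := (List.dropWhile_sublist _).mem (by rw [hmt]; exact List.mem_cons_self)
    have hxz : x ≤ z := (List.pairwise_cons.mp hs).1 z hzrest
    have hxlt : x < z := lt_of_le_of_ne hxz (Ne.symm hzx)
    have hpt : (z :: t').Pairwise (· ≤ ·) := by
      have := ((List.pairwise_cons.mp hs).2).sublist (List.dropWhile_sublist (l := rest) (· == x))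
      rwa [hmt] at this
    rcases List.mem_cons.mp hx with h | h
    · omega
    · have := (List.pairwise_cons.mp hpt).1 x h
      omega

theorem scanRuns_eq (s : List Int) (hs : s.Pairwise (· ≤ ·)) :
    ∃ ks : List Int, ks.Nodup ∧ (∀ y, y ∈ ks ↔ y ∈ s) ∧
      ∀ best : Int, 0 ≤ best → scanRuns s best = ks.foldl (mstep (fun i => s.count i)) best := by
  match s with
  | [] => exact ⟨[], by simp, by simp, fun best _ => by rw [scanRuns]; rfl⟩
  | x :: rest =>
    set tw := rest.takeWhile (· == x) with htw
    set t := rest.dropWhile (· == x) with hT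
    have hsplit : tw ++ t = rest := List.takeWhile_append_dropWhile
    have htwx : ∀ y ∈ tw, y = x := fun y hy => by
      simpa using List.mem_takeWhile_imp hy
    have hxt : x ∉ t := not_mem_dropWhile_of_sorted x rest hs
    have hpt : t.Pairwise (· ≤ ·) :=
      ((List.pairwise_cons.mp hs).2).sublist (List.dropWhile_sublist _)
    obtain ⟨ks', hnd', hmem', hfold'⟩ := scanRuns_eq t hpt
    -- counts in the full list
    have hcx : (x :: rest).count x = 1 + tw.length := by
      have h1 : tw.count x = tw.length := List.count_eq_length.mpr (fun b hb => (htwx b hb).symm)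
      have h2 : t.count x = 0 := List.count_eq_zero.mpr hxt
      rw [List.count_cons_self, ← hsplit, List.count_append, h1, h2]
      omega
    have hcother : ∀ y, y ≠ x → (x :: rest).count y = t.count y := by
      intro y hy
      have h1 : tw.count y = 0 := List.count_eq_zero.mpr (fun hmem => hy (htwx y hmem))
      rw [List.count_cons_of_ne (Ne.symm hy), ← hsplit, List.count_append, h1]
      omega
    refine ⟨x :: ks', ?_, ?_, ?_⟩
    · exact List.nodup_cons.mpr ⟨fun h => hxt ((hmem' x).mp h), hnd'⟩
    · intro y
      constructor
      · intro h
        rcases List.mem_cons.mp h with h | h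
        · exact h ▸ List.mem_cons_self
        · exact List.mem_cons_of_mem _ ((List.Sublist.mem · (List.dropWhile_sublist _)) ((hmem' y).mp h))
      · intro h
        rcases List.mem_cons.mp h with h | h
        · exact h ▸ List.mem_cons_self
        · rw [← hsplit] at h
          rcases List.mem_append.mp h with h | h
          · exact (htwx y h) ▸ List.mem_cons_self
          · exact List.mem_cons_of_mem _ ((hmem' y).mpr h)
    · intro best hb
      rw [scanRuns]
      simp only [← htw, ← hT]
      set run : Int := 1 + (tw.length : Int) with hrun
      set best' := if run > 1 ∧ x * run > best then x * run else best with hbest'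
      have hstep : best' = mstep (fun i => (x :: rest).count i) best x := by
        unfold mstep
        simp only [hcx]
        have : x * run = x * ((1 + tw.length : Nat) : Int) := by push_cast [hrun]; ring
        rw [hbest', this]
        have hrun1 : (run > 1) ↔ (1 < (1 + tw.length : Nat)) := by omega
        split_ifs with h1 h2 h2 <;> push_cast at * <;> omega
      have hb' : 0 ≤ best' := hstep ▸ mstep_nonneg _ _ _ hb
      rw [hfold' best' hb', List.foldl_cons, ← hstep]
      exact PySem.List.foldl_congr_mem ks' _ _ best' (fun acc i hi => by
        unfold mstep
        have hci := hcother i (fun he => hxt (he ▸ (hmem' i).mp hi))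
        simp only [hci])
termination_by s.length
decreasing_by
  exact Nat.lt_succ_of_le (List.length_dropWhile_le _ _)

theorem maior_soma_repetidos_eq (lista : List Int) :
    maior_soma_repetidos lista = maior_soma_repetidos_alt lista := by
  unfold maior_soma_repetidos maior_soma_repetidos_alt
  set s := PySem.List.sorted lista (fun x => x) false with hsdef
  have hsp : s.Pairwise (· ≤ ·) := PySem.List.sorted_pairwise lista (fun x => x)
  obtain ⟨ks, hnd, hmem, hfold⟩ := scanRuns_eq s hsp
  rw [foldA_eq lista _ 0 le_rfl, hfold 0 le_rfl]
  have hc : (fun i => s.count i) = (fun i => lista.count i) :=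
    funext fun i => (PySem.List.sorted_perm lista (fun x => x) false).count_eq i
  rw [hc]
  have hperm : ks.Perm (PySem.Set.ofList lista) :=
    (List.perm_ext_iff_of_nodup hnd (PySem.Set.nodup_ofList lista)).mpr (fun a => by
      rw [hmem a, PySem.Set.mem_ofList, hsdef, PySem.List.mem_sorted])
  exact (@List.Perm.foldl_eq _ _ _ _ _ (mstep_rcomm _) hperm 0).symm

-- ===== VERDICT (by name: the statement is the Claim_ definition above) =====
theorem maior_soma_repetidos_spec : Claim_equal_maior_soma_repetidos := by
  intro lista _
  exact maior_soma_repetidos_eq lista
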